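-- pv_equiv track=rewrite | github.com/gavjmooney/gamosa | src/gamosa/experiment_2.py | get_multi_metric_weights
-- ===== SOURCE A (Python) =====
-- def get_multi_metric_weights(metrics, weights):
--
--     weight_list = []
--
--     for metric_full in weights:
--         weight_list.append(metrics[metric_full])
--
--     metrics_short = ["EC", "EO", "AR", "EL", "GR"]
--
--     number_list = []
--
--     for short in metrics_short:
--         if short in weight_list:
--             number_list.append(1)
--         else:
--             number_list.append(0)
--
--     return number_list
-- ===== SOURCE B (Python) =====
-- def get_multi_metric_weights(metrics, weights):
--     index = {"EC": 0, "EO": 1, "AR": 2, "EL": 3, "GR": 4}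
--     result = [0, 0, 0, 0, 0]
--     for metric_full in weights:
--         v = metrics[metric_full]
--         if v in index:
--             result[index[v]] = 1
--     return result
-- ===== Notes on version B (the rewrite author's own statement) =====
-- stated objective: idiomatic
-- what changed: Replaces A's intermediate value list plus five membership scans with a position-index dict and a single marking pass over weights that sets result slots directly.
import Mathlib
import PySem

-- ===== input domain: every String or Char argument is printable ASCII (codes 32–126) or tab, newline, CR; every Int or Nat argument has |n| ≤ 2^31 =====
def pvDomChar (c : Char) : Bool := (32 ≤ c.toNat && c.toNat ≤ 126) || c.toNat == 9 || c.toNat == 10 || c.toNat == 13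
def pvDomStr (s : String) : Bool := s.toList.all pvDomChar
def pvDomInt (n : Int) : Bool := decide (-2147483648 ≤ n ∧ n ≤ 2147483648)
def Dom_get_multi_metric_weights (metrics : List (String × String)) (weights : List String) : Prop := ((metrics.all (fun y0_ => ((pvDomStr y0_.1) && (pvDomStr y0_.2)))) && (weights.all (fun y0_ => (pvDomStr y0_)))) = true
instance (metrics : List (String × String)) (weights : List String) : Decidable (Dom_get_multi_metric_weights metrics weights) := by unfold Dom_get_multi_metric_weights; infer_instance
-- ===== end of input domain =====

-- B replaces A's intermediate value list plus five membership scans with a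
-- position-index dict and a single marking pass over weights (idiomatic inversion).


-- shared dict-lookup primitive: metrics[m] (assoc list, first match; Pre_ guarantees the key is present)
def pvGetMetric (metrics : List (String × String)) (m : String) : String :=
  (metrics.lookup m).getD ""

-- ===== PORT A =====
def get_multi_metric_weights (metrics : List (String × String)) (weights : List String) : List Int :=
  let weight_list := weights.foldl (fun acc m => acc ++ [pvGetMetric metrics m]) []
  let metrics_short := ["EC", "EO", "AR", "EL", "GR"]
  metrics_short.foldl (fun acc s => acc ++ [if weight_list.contains s then (1 : Int) else 0]) []

-- ===== PORT B =====
def pvIndex : PySem.Dict String Nat :=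
  PySem.Dict.ofList [("EC", 0), ("EO", 1), ("AR", 2), ("EL", 3), ("GR", 4)]

-- loop body of B: v = metrics[m]; if v in index: result[index[v]] = 1
def pvMark (res : List Int) (v : String) : List Int :=
  match pvIndex.get? v with
  | some i => res.set i 1
  | none => res

def get_multi_metric_weights_alt (metrics : List (String × String)) (weights : List String) : List Int :=
  weights.foldl (fun res m => pvMark res (pvGetMetric metrics m)) [0, 0, 0, 0, 0]

-- ===== PRECONDITION & SPEC =====
-- Pre_ excludes exactly the inputs where Python A raises KeyError: some weight key missing from metrics.
def Pre_get_multi_metric_weights (metrics : List (String × String)) (weights : List String) : Prop :=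
  ∀ m ∈ weights, m ∈ metrics.map Prod.fst
instance (metrics : List (String × String)) (weights : List String) : Decidable (Pre_get_multi_metric_weights metrics weights) := by unfold Pre_get_multi_metric_weights; infer_instance

def pvWitness_get_multi_metric_weights : (List (String × String)) × List String :=
  ([("a", "EC"), ("b", "XX")], ["a", "b", "a"])

def Spec_get_multi_metric_weights (metrics : List (String × String)) (weights : List String) (out : List Int) : Prop := out = get_multi_metric_weights_alt metrics weights
instance (metrics : List (String × String)) (weights : List String) (out : List Int) : Decidable (Spec_get_multi_metric_weights metrics weights out) := by unfold Spec_get_multi_metric_weights; infer_instance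

-- ===== CLAIM (what is proved, stated in full; the proofs are below) =====
def Claim_equal_get_multi_metric_weights : Prop := ∀ (metrics : List (String × String)) (weights : List String), Dom_get_multi_metric_weights metrics weights → Pre_get_multi_metric_weights metrics weights → Spec_get_multi_metric_weights metrics weights (get_multi_metric_weights metrics weights)

-- ===== LEMMAS AND PROOFS =====

-- A's first loop builds acc ++ map
theorem pv_foldl_append_map (f : String → String) (ws : List String) (acc : List String) :
    ws.foldl (fun acc m => acc ++ [f m]) acc = acc ++ ws.map f := by
  induction ws generalizing acc with
  | nil => simp
  | cons w ws ih => simp [List.foldl_cons, ih, List.append_assoc]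

-- invariant of B's marking fold over the list of looked-up values
theorem pv_mark_fold (vs : List String) (a b c d e : Int) :
    vs.foldl pvMark [a, b, c, d, e] =
      [if vs.contains "EC" then 1 else a,
       if vs.contains "EO" then 1 else b,
       if vs.contains "AR" then 1 else c,
       if vs.contains "EL" then 1 else d,
       if vs.contains "GR" then 1 else e] := by
  induction vs generalizing a b c d e with
  | nil => simp
  | cons v vs ih =>
    rw [List.foldl_cons]
    by_cases h1 : v = "EC"
    · subst h1
      have hg : pvIndex.get? "EC" = some 0 := by decide
      rw [show pvMark [a, b, c, d, e] "EC" = [1, b, c, d, e] from by simp [pvMark, hg], ih]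
      simp
    · by_cases h2 : v = "EO"
      · subst h2
        have hg : pvIndex.get? "EO" = some 1 := by decide
        rw [show pvMark [a, b, c, d, e] "EO" = [a, 1, c, d, e] from by simp [pvMark, hg], ih]
        simp
      · by_cases h3 : v = "AR"
        · subst h3
          have hg : pvIndex.get? "AR" = some 2 := by decide
          rw [show pvMark [a, b, c, d, e] "AR" = [a, b, 1, d, e] from by simp [pvMark, hg], ih]
          simp
        · by_cases h4 : v = "EL"
          · subst h4
            have hg : pvIndex.get? "EL" = some 3 := by decide
            rw [show pvMark [a, b, c, d, e] "EL" = [a, b, c, 1, e] from by simp [pvMark, hg], ih]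
            simp
          · by_cases h5 : v = "GR"
            · subst h5
              have hg : pvIndex.get? "GR" = some 4 := by decide
              rw [show pvMark [a, b, c, d, e] "GR" = [a, b, c, d, 1] from by simp [pvMark, hg], ih]
              simp
            · have hmk : pvIndex = PySem.Dict.mk [("EC",0),("EO",1),("AR",2),("EL",3),("GR",4)] := by decide
              have hnone : pvIndex.get? v = none := by
                simp [hmk, Ne.symm h1, Ne.symm h2, Ne.symm h3, Ne.symm h4, Ne.symm h5, PySem.Dict.get?]
              rw [show pvMark [a, b, c, d, e] v = [a, b, c, d, e] from by simp [pvMark, hnone], ih]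
              simp [Ne.symm h1, Ne.symm h2, Ne.symm h3, Ne.symm h4, Ne.symm h5]

-- ===== VERDICT (by name: the statement is the Claim_ definition above) =====
theorem get_multi_metric_weights_spec : Claim_equal_get_multi_metric_weights := by
  intro metrics weights _ _
  unfold Spec_get_multi_metric_weights
  have hA : get_multi_metric_weights metrics weights =
      (["EC", "EO", "AR", "EL", "GR"] : List String).foldl
        (fun acc s => acc ++ [if (weights.map (pvGetMetric metrics)).contains s then (1 : Int) else 0]) [] := by
    unfold get_multi_metric_weights
    rw [pv_foldl_append_map]
    rfl
  have hB : get_multi_metric_weights_alt metrics weights =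
      (weights.map (pvGetMetric metrics)).foldl pvMark [0, 0, 0, 0, 0] := by
    unfold get_multi_metric_weights_alt
    rw [List.foldl_map]
  rw [hA, hB, pv_mark_fold]
  simp [List.foldl_cons]
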